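-- pv_equiv track=rewrite | github.com/RuZhan2024/Final_Project | Archive/labels/make_caucafall_labels.py | bool_runs_to_spans
-- ===== SOURCE A (Python) =====
-- from typing import Dict, List, Optional
--
-- def bool_runs_to_spans(flags: List[bool], min_run: int, gap_fill: int) -> List[List[int]]:
--     if not flags:
--         return []
--
--     # optional gap filling
--     if gap_fill > 0:
--         filled = flags[:]
--         i = 0
--         n = len(filled)
--         while i < n:
--             if filled[i]:
--                 i += 1
--                 continue
--             j = i
--             while j < n and not filled[j]:
--                 j += 1
--             gap_len = j - i
--             left_true = (i - 1 >= 0 and filled[i - 1])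
--             right_true = (j < n and filled[j])
--             if left_true and right_true and gap_len <= gap_fill:
--                 for k in range(i, j):
--                     filled[k] = True
--             i = j
--         flags = filled
--
--     spans: List[List[int]] = []
--     i = 0
--     n = len(flags)
--     while i < n:
--         if not flags[i]:
--             i += 1
--             continue
--         start = i
--         j = i
--         while j < n and flags[j]:
--             j += 1
--         stop = j
--         if (stop - start) >= max(1, int(min_run)):
--             spans.append([start, stop])
--         i = stop
--     return spans
-- ===== SOURCE B (Python) =====
-- def bool_runs_to_spans(flags, min_run, gap_fill):
--     # collect maximal true-runs as (start, stop) spans in one pass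
--     runs = []
--     start = None
--     idx = 0
--     for f in flags:
--         if f:
--             if start is None:
--                 start = idx
--         else:
--             if start is not None:
--                 runs.append((start, idx))
--                 start = None
--         idx += 1
--     if start is not None:
--         runs.append((start, idx))
--     # merge spans whose gap is small enough (gaps are >= 1, so gap_fill <= 0 merges nothing)
--     merged = []
--     for s, e in runs:
--         if merged and s - merged[-1][1] <= gap_fill:
--             merged[-1] = (merged[-1][0], e)
--         else:
--             merged.append((s, e))
--     keep = max(1, int(min_run))
--     return [[s, e] for s, e in merged if e - s >= keep]
-- ===== Notes on version B (the rewrite author's own statement) =====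
-- stated objective: alternative
-- what changed: A copies the flag array, fills small gaps in place with index-based while loops, then re-scans the filled array to extract runs; B never touches the array: it collects maximal true-runs as spans in one structural pass, merges consecutive spans whose gap is <= gap_fill, and filters by max(1, min_run).
import Mathlib
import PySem

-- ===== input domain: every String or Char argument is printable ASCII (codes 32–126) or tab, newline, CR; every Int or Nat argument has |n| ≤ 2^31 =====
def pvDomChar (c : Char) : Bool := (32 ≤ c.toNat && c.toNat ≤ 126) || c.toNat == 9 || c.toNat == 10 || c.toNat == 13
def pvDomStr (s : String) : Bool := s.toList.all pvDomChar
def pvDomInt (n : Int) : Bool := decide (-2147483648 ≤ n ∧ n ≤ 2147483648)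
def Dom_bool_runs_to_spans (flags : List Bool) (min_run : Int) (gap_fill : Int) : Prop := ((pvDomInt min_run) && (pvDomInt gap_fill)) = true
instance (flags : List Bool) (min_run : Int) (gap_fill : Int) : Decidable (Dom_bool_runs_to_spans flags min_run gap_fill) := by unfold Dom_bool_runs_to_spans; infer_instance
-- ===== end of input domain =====

-- B replaces A's fill-the-array-then-re-extract strategy by a single structural pass that
-- collects true-runs as spans, merges spans across small gaps and filters by min length.

-- ===== PORT A =====
-- inner loop `while j < n and not filled[j]: j += 1`; indices stay in range, so filled[j] is pyGetD
def pySkipFalse (l : List Bool) (n j : Int) : Int :=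
  if h : j < n ∧ PySem.List.pyGetD l j false = false then pySkipFalse l n (j + 1) else j
termination_by (n - j).toNat
decreasing_by omega

-- inner loop `while j < n and flags[j]: j += 1`
def pySkipTrue (l : List Bool) (n j : Int) : Int :=
  if h : j < n ∧ PySem.List.pyGetD l j false = true then pySkipTrue l n (j + 1) else j
termination_by (n - j).toNat
decreasing_by omega

theorem pySkipFalse_le (l : List Bool) (n j : Int) : j ≤ pySkipFalse l n j := by
  unfold pySkipFalse
  split
  · have := pySkipFalse_le l n (j + 1); omega
  · omega
termination_by (n - j).toNat
decreasing_by omega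

theorem pySkipTrue_le (l : List Bool) (n j : Int) : j ≤ pySkipTrue l n j := by
  unfold pySkipTrue
  split
  · have := pySkipTrue_le l n (j + 1); omega
  · omega
termination_by (n - j).toNat
decreasing_by omega

theorem pySkipFalse_gt (l : List Bool) (n i : Int) (hi : i < n)
    (hg : PySem.List.pyGetD l i false = false) : i < pySkipFalse l n i := by
  unfold pySkipFalse
  rw [dif_pos ⟨hi, hg⟩]
  have := pySkipFalse_le l n (i + 1); omega

theorem pySkipTrue_gt (l : List Bool) (n i : Int) (hi : i < n)
    (hg : PySem.List.pyGetD l i false = true) : i < pySkipTrue l n i := by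
  unfold pySkipTrue
  rw [dif_pos ⟨hi, hg⟩]
  have := pySkipTrue_le l n (i + 1); omega

-- the outer `while i < n` gap-filling loop of A
def pyFillLoop (filled : List Bool) (gap_fill n i : Int) : List Bool :=
  if hi : i < n then
    if ht : PySem.List.pyGetD filled i false then pyFillLoop filled gap_fill n (i + 1)
    else
      let j := pySkipFalse filled n i
      let gap_len := j - i
      let left_true := decide (0 ≤ i - 1) && PySem.List.pyGetD filled (i - 1) false
      let right_true := decide (j < n) && PySem.List.pyGetD filled j false
      let filled' := if left_true && right_true && decide (gap_len ≤ gap_fill)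
        then (PySem.List.pyRange i j 1).foldl (fun acc k => PySem.List.pySetD acc k true) filled
        else filled
      pyFillLoop filled' gap_fill n j
  else filled
termination_by (n - i).toNat
decreasing_by
  · omega
  · have := pySkipFalse_gt filled n i hi (by simpa using ht); omega

-- the span-extraction `while i < n` loop of A
def pySpansLoop (flags : List Bool) (min_run n i : Int) (spans : List (List Int)) : List (List Int) :=
  if hi : i < n then
    if ht : PySem.List.pyGetD flags i false = false then pySpansLoop flags min_run n (i + 1) spans
    else
      let stop := pySkipTrue flags n i
      let spans' := if stop - i ≥ max 1 min_run then spans ++ [[i, stop]] else spans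
      pySpansLoop flags min_run n stop spans'
  else spans
termination_by (n - i).toNat
decreasing_by
  · omega
  · have := pySkipTrue_gt flags n i hi (by simpa using ht); omega

def bool_runs_to_spans (flags : List Bool) (min_run : Int) (gap_fill : Int) : List (List Int) :=
  if flags.isEmpty then []
  else
    let flags' := if gap_fill > 0 then pyFillLoop flags gap_fill (flags.length : Int) 0 else flags
    pySpansLoop flags' min_run (flags'.length : Int) 0 []

-- ===== PORT B =====
-- one pass over flags: state (collected runs, open-run start, current index)
def altStep (st : List (Int × Int) × Option Int × Int) (f : Bool) :
    List (Int × Int) × Option Int × Int :=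
  if f then (st.1, (if st.2.1.isNone then some st.2.2 else st.2.1), st.2.2 + 1)
  else
    match st.2.1 with
    | some s => (st.1 ++ [(s, st.2.2)], none, st.2.2 + 1)
    | none => (st.1, none, st.2.2 + 1)

def altCollect (flags : List Bool) : List (Int × Int) :=
  let st := flags.foldl altStep ([], none, 0)
  match st.2.1 with
  | some s => st.1 ++ [(s, st.2.2)]
  | none => st.1

-- merge consecutive spans whose gap is ≤ gap_fill (mutation of merged[-1] becomes dropLast ++ [_])
def altMergeStep (g : Int) (merged : List (Int × Int)) (se : Int × Int) : List (Int × Int) :=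
  match merged.getLast? with
  | some last => if se.1 - last.2 ≤ g then merged.dropLast ++ [(last.1, se.2)] else merged ++ [se]
  | none => merged ++ [se]

def altMerge (g : Int) (runs : List (Int × Int)) : List (Int × Int) :=
  runs.foldl (altMergeStep g) []

def bool_runs_to_spans_alt (flags : List Bool) (min_run : Int) (gap_fill : Int) : List (List Int) :=
  let merged := altMerge gap_fill (altCollect flags)
  let keep := max 1 min_run
  (merged.filter (fun se => se.2 - se.1 ≥ keep)).map (fun se => [se.1, se.2])

-- ===== PRECONDITION & SPEC =====
def Spec_bool_runs_to_spans (flags : List Bool) (min_run : Int) (gap_fill : Int) (out : List (List Int)) : Prop := out = bool_runs_to_spans_alt flags min_run gap_fill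
instance (flags : List Bool) (min_run : Int) (gap_fill : Int) (out : List (List Int)) : Decidable (Spec_bool_runs_to_spans flags min_run gap_fill out) := by unfold Spec_bool_runs_to_spans; infer_instance

-- ===== CLAIM (what is proved, stated in full; the proofs are below) =====
def Claim_equal_bool_runs_to_spans : Prop := ∀ (flags : List Bool) (min_run : Int) (gap_fill : Int), Dom_bool_runs_to_spans flags min_run gap_fill → Spec_bool_runs_to_spans flags min_run gap_fill (bool_runs_to_spans flags min_run gap_fill)

-- ===== LEMMAS AND PROOFS =====

-- reference run extractor: runsGo start p l = true-runs of l, positions counted from p,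
-- with an optional run open since `start`
def runsGo : Option Int → Int → List Bool → List (Int × Int)
  | none, _, [] => []
  | some s, p, [] => [(s, p)]
  | none, p, true :: xs => runsGo (some p) (p + 1) xs
  | some s, p, true :: xs => runsGo (some s) (p + 1) xs
  | none, p, false :: xs => runsGo none (p + 1) xs
  | some s, p, false :: xs => (s, p) :: runsGo none (p + 1) xs

-- reference merge
def mergeGo (g : Int) : (Int × Int) → List (Int × Int) → List (Int × Int)
  | cur, [] => [cur]
  | cur, r :: rs => if r.1 - cur.2 ≤ g then mergeGo g (cur.1, r.2) rs else cur :: mergeGo g r rs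

def mergeRuns (g : Int) : List (Int × Int) → List (Int × Int)
  | [] => []
  | r :: rs => mergeGo g r rs

-- structural description of A's gap-filling pass; `left` = "position before l is an (already) true cell"
def fillS (left : Bool) (g : Int) : List Bool → List Bool
  | [] => []
  | true :: xs => true :: fillS true g xs
  | false :: xs =>
      let k := ((false :: xs).takeWhile (fun b => !b)).length
      let rest := (false :: xs).dropWhile (fun b => !b)
      (if left && !rest.isEmpty && decide ((k : Int) ≤ g) then List.replicate k true
       else List.replicate k false) ++ fillS true g rest
termination_by l => l.length
decreasing_by
  · simp
  · simp only [List.dropWhile, Bool.not_false]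
    have := List.length_dropWhile_le (fun b => !b) xs
    simp; omega


-- ---------- generic list helpers ----------

theorem pv_dropWhile_eq_drop (p : Bool → Bool) (l : List Bool) :
    l.dropWhile p = l.drop (l.takeWhile p).length := by
  induction l with
  | nil => rfl
  | cons x xs ih =>
    by_cases hx : p x
    · simp [List.takeWhile_cons, List.dropWhile_cons, hx, ih]
    · simp [List.takeWhile_cons, List.dropWhile_cons, hx]

theorem pv_takeWhile_not_replicate (l : List Bool) :
    l.takeWhile (fun b => !b) = List.replicate (l.takeWhile (fun b => !b)).length false := by
  induction l with
  | nil => rfl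
  | cons x xs ih =>
    cases x
    · simpa [List.takeWhile_cons, List.replicate_succ] using ih
    · simp [List.takeWhile_cons]

theorem pv_takeWhile_id_replicate (l : List Bool) :
    l.takeWhile (fun b => b) = List.replicate (l.takeWhile (fun b => b)).length true := by
  induction l with
  | nil => rfl
  | cons x xs ih =>
    cases x
    · simp [List.takeWhile_cons]
    · simpa [List.takeWhile_cons, List.replicate_succ] using ih

theorem pv_head?_dropWhile_not (l : List Bool) :
    (l.dropWhile (fun b => !b)).head? ≠ some false := by
  induction l with
  | nil => simp [List.dropWhile]
  | cons x xs ih =>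
    cases x
    · simpa [List.dropWhile_cons] using ih
    · simp [List.dropWhile_cons]

theorem pv_head?_dropWhile_id (l : List Bool) :
    (l.dropWhile (fun b => b)).head? ≠ some true := by
  induction l with
  | nil => simp [List.dropWhile]
  | cons x xs ih =>
    cases x
    · simp [List.dropWhile_cons]
    · simpa [List.dropWhile_cons] using ih

-- ---------- runsGo block lemmas ----------

theorem runsGo_close (l : List Bool) (p s : Int) (h : l.head? ≠ some true) :
    runsGo (some s) p l = (s, p) :: runsGo none p l := by
  cases l with
  | nil => rfl
  | cons b xs =>
    cases b
    · rfl
    · simp at h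

theorem runs_falses (k : Nat) (r : List Bool) (p : Int) :
    runsGo none p (List.replicate k false ++ r) = runsGo none (p + (k : Int)) r := by
  induction k generalizing p with
  | zero => simp
  | succ k ih =>
    rw [List.replicate_succ, List.cons_append]
    show runsGo none (p + 1) _ = _
    rw [ih]
    congr 1
    push_cast
    ring

theorem runs_trues (k : Nat) (r : List Bool) (p s : Int) :
    runsGo (some s) p (List.replicate k true ++ r) = runsGo (some s) (p + (k : Int)) r := by
  induction k generalizing p with
  | zero => simp
  | succ k ih =>
    rw [List.replicate_succ, List.cons_append]
    show runsGo (some s) (p + 1) _ = _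
    rw [ih]
    congr 1
    push_cast
    ring

theorem runs_none_true_block (k : Nat) (hk : k ≠ 0) (r : List Bool) (p : Int) :
    runsGo none p (List.replicate k true ++ r) = runsGo (some p) (p + (k : Int)) r := by
  cases k with
  | zero => exact absurd rfl hk
  | succ k =>
    rw [List.replicate_succ, List.cons_append]
    show runsGo (some p) (p + 1) _ = _
    rw [runs_trues]
    congr 1
    push_cast
    ring

theorem runsGo_some_spec (l : List Bool) (p s : Int) :
    runsGo (some s) p l
      = (s, p + ((l.takeWhile (fun b => b)).length : Int))
          :: runsGo none (p + ((l.takeWhile (fun b => b)).length : Int)) (l.dropWhile (fun b => b)) := by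
  induction l generalizing p with
  | nil => simp [runsGo, List.takeWhile, List.dropWhile]
  | cons x xs ih =>
    cases x
    · have : runsGo (some s) p (false :: xs) = (s, p) :: runsGo none p (false :: xs) :=
        runsGo_close _ _ _ (by simp)
      simpa [List.takeWhile_cons, List.dropWhile_cons] using this
    · show runsGo (some s) (p + 1) xs = _
      rw [ih]
      have h1 : (true :: xs).takeWhile (fun b => b) = true :: xs.takeWhile (fun b => b) := by
        simp [List.takeWhile_cons]
      have h2 : (true :: xs).dropWhile (fun b => b) = xs.dropWhile (fun b => b) := by
        simp [List.dropWhile_cons]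
      have h3 : p + (((xs.takeWhile (fun b => b)).length + 1 : Nat) : Int)
          = p + 1 + ((xs.takeWhile (fun b => b)).length : Int) := by push_cast; ring
      rw [h1, h2, List.length_cons, h3]

-- first-run decomposition of runsGo none
theorem runs_decomp (l : List Bool) (p : Int)
    (hne : l.dropWhile (fun b => !b) ≠ []) :
    runsGo none p l
      = (p + ((l.takeWhile (fun b => !b)).length : Int),
         p + ((l.takeWhile (fun b => !b)).length : Int)
           + (((l.dropWhile (fun b => !b)).takeWhile (fun b => b)).length : Int))
        :: runsGo none
            (p + ((l.takeWhile (fun b => !b)).length : Int)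
               + (((l.dropWhile (fun b => !b)).takeWhile (fun b => b)).length : Int))
            ((l.dropWhile (fun b => !b)).dropWhile (fun b => b)) := by
  set d1 := l.dropWhile (fun b => !b) with hd1
  have hhead : d1.head? ≠ some false := pv_head?_dropWhile_not l
  have hd1true : d1 = true :: d1.tail := by
    cases hd : d1 with
    | nil => exact absurd hd hne
    | cons b tl =>
      cases b
      · rw [hd] at hhead; simp at hhead
      · simp [hd]
  have hk : (d1.takeWhile (fun b => b)).length ≠ 0 := by
    rw [hd1true]
    simp [List.takeWhile_cons]
  have hl : l = l.takeWhile (fun b => !b) ++ d1 := (List.takeWhile_append_dropWhile).symm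
  have hd1split : d1 = d1.takeWhile (fun b => b) ++ d1.dropWhile (fun b => b) :=
    (List.takeWhile_append_dropWhile).symm
  calc runsGo none p l
      = runsGo none p (List.replicate (l.takeWhile (fun b => !b)).length false ++ d1) := by
        conv_lhs => rw [hl, pv_takeWhile_not_replicate]
    _ = runsGo none (p + ((l.takeWhile (fun b => !b)).length : Int)) d1 := runs_falses _ _ _
    _ = runsGo none (p + ((l.takeWhile (fun b => !b)).length : Int))
          (List.replicate (d1.takeWhile (fun b => b)).length true ++ d1.dropWhile (fun b => b)) := by
        conv_lhs => rw [hd1split, pv_takeWhile_id_replicate]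
    _ = runsGo (some (p + ((l.takeWhile (fun b => !b)).length : Int)))
          (p + ((l.takeWhile (fun b => !b)).length : Int) + ((d1.takeWhile (fun b => b)).length : Int))
          (d1.dropWhile (fun b => b)) := runs_none_true_block _ hk _ _
    _ = _ := by
        rw [runsGo_close _ _ _ (pv_head?_dropWhile_id d1)]

theorem runs_decomp_nil (l : List Bool) (p : Int)
    (hnil : l.dropWhile (fun b => !b) = []) :
    runsGo none p l = [] := by
  have hl : l = l.takeWhile (fun b => !b) := by
    conv_lhs => rw [← List.takeWhile_append_dropWhile (p := fun b => !b) (l := l)]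
    rw [hnil, List.append_nil]
  calc runsGo none p l
      = runsGo none p (List.replicate (l.takeWhile (fun b => !b)).length false ++ []) := by
        conv_lhs => rw [hl, pv_takeWhile_not_replicate]
        rw [List.append_nil]
    _ = runsGo none (p + ((l.takeWhile (fun b => !b)).length : Int)) [] := runs_falses _ _ _
    _ = [] := rfl


-- ---------- A-side loop characterizations ----------

theorem pySkipFalse_spec (l : List Bool) (i : Int) (h0 : 0 ≤ i) :
    pySkipFalse l (l.length : Int) i
      = i + (((l.drop i.toNat).takeWhile (fun b => !b)).length : Int) := by
  unfold pySkipFalse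
  by_cases hi : i < (l.length : Int)
  · have hlt : i.toNat < l.length := by omega
    have hdrop : l.drop i.toNat = l[i.toNat] :: l.drop (i.toNat + 1) := List.drop_eq_getElem_cons hlt
    have hget : PySem.List.pyGetD l i false = l[i.toNat] := PySem.List.pyGetD_eq_getElem l false h0 hi
    cases hb : l[i.toNat]
    · rw [dif_pos ⟨hi, by rw [hget, hb]⟩]
      rw [pySkipFalse_spec l (i + 1) (by omega)]
      have hnat : (i + 1).toNat = i.toNat + 1 := by omega
      rw [hnat, hdrop, hb]
      simp [List.takeWhile_cons]
      push_cast
      ring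
    · rw [dif_neg (by rw [hget, hb]; simp)]
      rw [hdrop, hb]
      simp [List.takeWhile_cons]
  · rw [dif_neg (by intro h; exact hi h.1)]
    have : l.drop i.toNat = [] := by
      apply List.drop_eq_nil_of_le
      omega
    rw [this]
    simp
termination_by ((l.length : Int) - i).toNat
decreasing_by omega

theorem pySkipTrue_spec (l : List Bool) (i : Int) (h0 : 0 ≤ i) :
    pySkipTrue l (l.length : Int) i
      = i + (((l.drop i.toNat).takeWhile (fun b => b)).length : Int) := by
  unfold pySkipTrue
  by_cases hi : i < (l.length : Int)
  · have hlt : i.toNat < l.length := by omega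
    have hdrop : l.drop i.toNat = l[i.toNat] :: l.drop (i.toNat + 1) := List.drop_eq_getElem_cons hlt
    have hget : PySem.List.pyGetD l i false = l[i.toNat] := PySem.List.pyGetD_eq_getElem l false h0 hi
    cases hb : l[i.toNat]
    · rw [dif_neg (by rw [hget, hb]; simp)]
      rw [hdrop, hb]
      simp [List.takeWhile_cons]
    · rw [dif_pos ⟨hi, by rw [hget, hb]⟩]
      rw [pySkipTrue_spec l (i + 1) (by omega)]
      have hnat : (i + 1).toNat = i.toNat + 1 := by omega
      rw [hnat, hdrop, hb]
      simp [List.takeWhile_cons]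
      push_cast
      ring
  · rw [dif_neg (by intro h; exact hi h.1)]
    have : l.drop i.toNat = [] := by
      apply List.drop_eq_nil_of_le
      omega
    rw [this]
    simp
termination_by ((l.length : Int) - i).toNat
decreasing_by omega

theorem pyFillRange_spec (l : List Bool) (i j : Int) (h0 : 0 ≤ i) (hij : i ≤ j)
    (hj : j ≤ (l.length : Int)) :
    (PySem.List.pyRange i j 1).foldl (fun acc k => PySem.List.pySetD acc k true) l
      = l.take i.toNat ++ List.replicate (j - i).toNat true ++ l.drop j.toNat := by
  by_cases hlt : i < j
  · rw [PySem.List.pyRange_one_cons hlt, List.foldl_cons]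
    have hset : PySem.List.pySetD l i true = l.set i.toNat true := PySem.List.pySetD_of_nonneg l true h0
    rw [hset]
    rw [pyFillRange_spec (l.set i.toNat true) (i + 1) j (by omega) (by omega)
        (by rw [List.length_set]; exact hj)]
    have hlen : i.toNat < l.length := by omega
    have hsplit : l.set i.toNat true = l.take i.toNat ++ true :: l.drop (i.toNat + 1) :=
      List.set_eq_take_cons_drop true hlen
    have h1 : (l.set i.toNat true).take (i + 1).toNat = l.take i.toNat ++ [true] := by
      rw [hsplit]
      have hti : (l.take i.toNat).length = i.toNat := by
        rw [List.length_take]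
        omega
      have : (i + 1).toNat = i.toNat + 1 := by omega
      rw [this, List.take_append, hti]
      simp
    have h2 : (l.set i.toNat true).drop j.toNat = l.drop j.toNat := by
      rw [List.drop_set]
      rw [if_pos (by omega)]
    rw [h1, h2]
    have h3 : (j - i).toNat = (j - (i + 1)).toNat + 1 := by omega
    rw [h3, List.replicate_succ]
    simp
  · have hji : j = i := by omega
    rw [PySem.List.pyRange_one_eq_nil (by omega)]
    subst hji
    simp [List.take_append_drop]
termination_by (j - i).toNat
decreasing_by omega


-- ---------- fillS lemmas ----------

theorem fillS_true_cons (a : Bool) (g : Int) (xs : List Bool) :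
    fillS a g (true :: xs) = true :: fillS true g xs := by
  rw [fillS.eq_def]

theorem fillS_false_eq (a : Bool) (g : Int) (xs : List Bool) :
    fillS a g (false :: xs)
      = (if a && !((false :: xs).dropWhile (fun b => !b)).isEmpty
            && decide (((((false :: xs).takeWhile (fun b => !b)).length : Nat) : Int) ≤ g)
         then List.replicate ((false :: xs).takeWhile (fun b => !b)).length true
         else List.replicate ((false :: xs).takeWhile (fun b => !b)).length false)
        ++ fillS true g ((false :: xs).dropWhile (fun b => !b)) := by
  rw [fillS.eq_def]

theorem fillS_flag (a b : Bool) (g : Int) (l : List Bool) (h : l.head? ≠ some false) :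
    fillS a g l = fillS b g l := by
  cases l with
  | nil => rw [fillS.eq_def, fillS.eq_def]
  | cons x xs =>
    cases x
    · simp at h
    · rw [fillS_true_cons, fillS_true_cons]

theorem fillS_trues_true (k : Nat) (r : List Bool) (g : Int) :
    fillS true g (List.replicate k true ++ r) = List.replicate k true ++ fillS true g r := by
  induction k with
  | zero => simp
  | succ k ih =>
    rw [List.replicate_succ, List.cons_append, fillS_true_cons, ih]
    simp [List.replicate_succ]

theorem fillS_trues (k : Nat) (r : List Bool) (a : Bool) (g : Int) (hk : k ≠ 0) :
    fillS a g (List.replicate k true ++ r) = List.replicate k true ++ fillS true g r := by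
  cases k with
  | zero => exact absurd rfl hk
  | succ k =>
    rw [List.replicate_succ, List.cons_append, fillS_true_cons, fillS_trues_true]
    simp [List.replicate_succ]


theorem fillS_nil (a : Bool) (g : Int) : fillS a g [] = [] := by
  rw [fillS.eq_def]

theorem pv_takeWhile_eq_take (p : Bool → Bool) (l : List Bool) :
    l.takeWhile p = l.take (l.takeWhile p).length := by
  induction l with
  | nil => rfl
  | cons x xs ih =>
    by_cases hx : p x
    · rw [List.takeWhile_cons_of_pos hx, List.length_cons, List.take_succ_cons, ← ih]
    · rw [List.takeWhile_cons_of_neg hx]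
      rfl

theorem pyFillLoop_spec (filled : List Bool) (g i : Int) (h0 : 0 ≤ i) :
    pyFillLoop filled g (filled.length : Int) i
      = filled.take i.toNat
          ++ fillS (decide (0 ≤ i - 1) && PySem.List.pyGetD filled (i - 1) false) g
               (filled.drop i.toNat) := by
  unfold pyFillLoop
  by_cases hi : i < (filled.length : Int)
  case neg =>
    rw [dif_neg hi]
    have hdropnil : filled.drop i.toNat = [] := List.drop_eq_nil_of_le (by omega)
    rw [hdropnil, fillS_nil, List.append_nil, List.take_of_length_le (by omega)]
  case pos =>
    have hlt : i.toNat < filled.length := by omega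
    have hdrop : filled.drop i.toNat = filled[i.toNat] :: filled.drop (i.toNat + 1) :=
      List.drop_eq_getElem_cons hlt
    have hget : PySem.List.pyGetD filled i false = filled[i.toNat] :=
      PySem.List.pyGetD_eq_getElem filled false h0 hi
    rw [dif_pos hi]
    cases hb : filled[i.toNat] with
    | true =>
      rw [dif_pos (by rw [hget, hb])]
      rw [pyFillLoop_spec filled g (i + 1) (by omega)]
      have e1 : i + 1 - 1 = i := by ring
      have e2 : (i + 1).toNat = i.toNat + 1 := by omega
      rw [e1, e2, hdrop, hb, fillS_true_cons]
      have e3 : filled.take (i.toNat + 1) = filled.take i.toNat ++ [filled[i.toNat]] := by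
        rw [List.take_succ, List.getElem?_eq_getElem hlt]
        rfl
      rw [e3, hb, hget, hb]
      have e4 : decide (0 ≤ i) = true := by simp [h0]
      rw [e4]
      simp
    | false =>
      rw [dif_neg (by rw [hget, hb]; simp)]
      dsimp only
      have hj := pySkipFalse_spec filled i h0
      rw [hj]
      have hm1 : 1 ≤ ((filled.drop i.toNat).takeWhile (fun b => !b)).length := by
        rw [hdrop, hb, List.takeWhile_cons]
        simp
      have hmlen : ((filled.drop i.toNat).takeWhile (fun b => !b)).length ≤ filled.length - i.toNat := by
        have h1 : (((filled.drop i.toNat).takeWhile (fun b => !b)).length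
            + ((filled.drop i.toNat).dropWhile (fun b => !b)).length) = (filled.drop i.toNat).length := by
          rw [← List.length_append, List.takeWhile_append_dropWhile]
        rw [List.length_drop] at h1
        omega
      have hjnat : (i + (((filled.drop i.toNat).takeWhile (fun b => !b)).length : Int)).toNat
          = i.toNat + ((filled.drop i.toNat).takeWhile (fun b => !b)).length := by omega
      have hrest : (filled.drop i.toNat).dropWhile (fun b => !b)
          = filled.drop (i.toNat + ((filled.drop i.toNat).takeWhile (fun b => !b)).length) := by
        rw [pv_dropWhile_eq_drop, List.drop_drop]
      -- right_true equals "the gap is interior" (there is a true cell right of it)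
      have hRT : (decide (i + (((filled.drop i.toNat).takeWhile (fun b => !b)).length : Int) < (filled.length : Int))
            && PySem.List.pyGetD filled (i + (((filled.drop i.toNat).takeWhile (fun b => !b)).length : Int)) false)
          = !((filled.drop i.toNat).dropWhile (fun b => !b)).isEmpty := by
        by_cases hin : i + (((filled.drop i.toNat).takeWhile (fun b => !b)).length : Int) < (filled.length : Int)
        · have hlt2 : i.toNat + ((filled.drop i.toNat).takeWhile (fun b => !b)).length < filled.length := by omega
          have hg2 : PySem.List.pyGetD filled (i + (((filled.drop i.toNat).takeWhile (fun b => !b)).length : Int)) false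
              = filled[(i + (((filled.drop i.toNat).takeWhile (fun b => !b)).length : Int)).toNat] :=
            PySem.List.pyGetD_eq_getElem filled false (by omega) hin
          have hdrop2 : filled.drop (i.toNat + ((filled.drop i.toNat).takeWhile (fun b => !b)).length)
              = filled[i.toNat + ((filled.drop i.toNat).takeWhile (fun b => !b)).length]
                :: filled.drop (i.toNat + ((filled.drop i.toNat).takeWhile (fun b => !b)).length + 1) :=
            List.drop_eq_getElem_cons hlt2
          have hhd := pv_head?_dropWhile_not (filled.drop i.toNat)
          have hhd2 : ((filled.drop i.toNat).dropWhile (fun b => !b)).head?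
              = some filled[i.toNat + ((filled.drop i.toNat).takeWhile (fun b => !b)).length] := by
            rw [hrest, hdrop2]
            rfl
          have hbt : filled[i.toNat + ((filled.drop i.toNat).takeWhile (fun b => !b)).length] = true := by
            cases hx : filled[i.toNat + ((filled.drop i.toNat).takeWhile (fun b => !b)).length]
            · rw [hhd2, hx] at hhd; simp at hhd
            · rfl
          have hie : ((filled.drop i.toNat).dropWhile (fun b => !b)).isEmpty = false := by
            rw [hrest, hdrop2]
            rfl
          rw [hg2]
          simp only [hjnat]
          rw [hbt, hie]
          simp [hin]
        · have hnil : filled.drop (i.toNat + ((filled.drop i.toNat).takeWhile (fun b => !b)).length) = [] :=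
            List.drop_eq_nil_of_le (by omega)
          rw [hrest, hnil]
          simp [hin]
      rw [hRT]
      have hgap : i + ((((filled.drop i.toNat).takeWhile (fun b => !b)).length : Nat) : Int) - i = ((((filled.drop i.toNat).takeWhile (fun b => !b)).length : Nat) : Int) := by ring
      rw [hgap]
      have hdrop' : filled.drop i.toNat = false :: filled.drop (i.toNat + 1) := by rw [hdrop, hb]
      conv_rhs => rw [hdrop', fillS_false_eq, ← hdrop']
      split_ifs with hc
      · -- the gap is filled with True
        have hfr := pyFillRange_spec filled i (i + (((filled.drop i.toNat).takeWhile (fun b => !b)).length : Int)) h0 (by omega) (by omega)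
        rw [hfr]
        have hmm : (i + (((filled.drop i.toNat).takeWhile (fun b => !b)).length : Int) - i).toNat = ((filled.drop i.toNat).takeWhile (fun b => !b)).length := by omega
        rw [hmm, hjnat]
        have hlen' : (filled.take i.toNat ++ List.replicate ((filled.drop i.toNat).takeWhile (fun b => !b)).length true
            ++ filled.drop (i.toNat + ((filled.drop i.toNat).takeWhile (fun b => !b)).length)).length = filled.length := by
          simp [List.length_take]
          omega
        have hpre : (filled.take i.toNat ++ List.replicate ((filled.drop i.toNat).takeWhile (fun b => !b)).length true).length
            = i.toNat + ((filled.drop i.toNat).takeWhile (fun b => !b)).length := by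
          simp [List.length_take]
          omega
        have hcast : ((filled.length : Nat) : Int)
            = (((filled.take i.toNat ++ List.replicate ((filled.drop i.toNat).takeWhile (fun b => !b)).length true
                ++ filled.drop (i.toNat + ((filled.drop i.toNat).takeWhile (fun b => !b)).length)).length : Nat) : Int) := by rw [hlen']
        rw [hcast, pyFillLoop_spec _ g (i + (((filled.drop i.toNat).takeWhile (fun b => !b)).length : Int)) (by omega)]
        have hdropF : (filled.take i.toNat ++ List.replicate ((filled.drop i.toNat).takeWhile (fun b => !b)).length true
            ++ filled.drop (i.toNat + ((filled.drop i.toNat).takeWhile (fun b => !b)).length)).drop (i + (((filled.drop i.toNat).takeWhile (fun b => !b)).length : Int)).toNat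
            = filled.drop (i.toNat + ((filled.drop i.toNat).takeWhile (fun b => !b)).length) := by
          rw [hjnat, ← hpre, List.drop_left]
        have htakeF : (filled.take i.toNat ++ List.replicate ((filled.drop i.toNat).takeWhile (fun b => !b)).length true
            ++ filled.drop (i.toNat + ((filled.drop i.toNat).takeWhile (fun b => !b)).length)).take (i + (((filled.drop i.toNat).takeWhile (fun b => !b)).length : Int)).toNat
            = filled.take i.toNat ++ List.replicate ((filled.drop i.toNat).takeWhile (fun b => !b)).length true := by
          rw [hjnat, ← hpre, List.take_left]
        have hflag : PySem.List.pyGetD (filled.take i.toNat ++ List.replicate ((filled.drop i.toNat).takeWhile (fun b => !b)).length true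
            ++ filled.drop (i.toNat + ((filled.drop i.toNat).takeWhile (fun b => !b)).length)) (i + (((filled.drop i.toNat).takeWhile (fun b => !b)).length : Int) - 1) false = true := by
          have h0' : (0:Int) ≤ i + (((filled.drop i.toNat).takeWhile (fun b => !b)).length : Int) - 1 := by omega
          have hlt' : i + (((filled.drop i.toNat).takeWhile (fun b => !b)).length : Int) - 1
              < (((filled.take i.toNat ++ List.replicate ((filled.drop i.toNat).takeWhile (fun b => !b)).length true
                  ++ filled.drop (i.toNat + ((filled.drop i.toNat).takeWhile (fun b => !b)).length)).length : Nat) : Int) := by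
            rw [hlen']; omega
          rw [PySem.List.pyGetD_eq_getElem _ false h0' hlt']
          have hidx : (i + (((filled.drop i.toNat).takeWhile (fun b => !b)).length : Int) - 1).toNat = i.toNat + ((filled.drop i.toNat).takeWhile (fun b => !b)).length - 1 := by omega
          simp only [hidx]
          rw [List.getElem_append_left (by rw [hpre]; omega)]
          rw [List.getElem_append_right (by simp [List.length_take]; omega)]
          exact List.getElem_replicate _
        have hdec1 : decide ((0:Int) ≤ i + (((filled.drop i.toNat).takeWhile (fun b => !b)).length : Int) - 1) = true := by
          simp; omega
        rw [hdropF, htakeF, hflag, hdec1, ← hrest]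
        simp [List.append_assoc]
      · -- the gap stays False
        rw [pyFillLoop_spec filled g (i + (((filled.drop i.toNat).takeWhile (fun b => !b)).length : Int)) (by omega)]
        have hsplit : filled.drop i.toNat
            = List.replicate ((filled.drop i.toNat).takeWhile (fun b => !b)).length false ++ (filled.drop i.toNat).dropWhile (fun b => !b) := by
          conv_lhs => rw [← List.takeWhile_append_dropWhile (p := fun b => !b)
            (l := filled.drop i.toNat), pv_takeWhile_not_replicate]
        have hflag : PySem.List.pyGetD filled (i + (((filled.drop i.toNat).takeWhile (fun b => !b)).length : Int) - 1) false = false := by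
          have h0' : (0:Int) ≤ i + (((filled.drop i.toNat).takeWhile (fun b => !b)).length : Int) - 1 := by omega
          have hlt' : i + (((filled.drop i.toNat).takeWhile (fun b => !b)).length : Int) - 1 < ((filled.length : Nat) : Int) := by omega
          rw [PySem.List.pyGetD_eq_getElem _ false h0' hlt']
          have hidx : (i + (((filled.drop i.toNat).takeWhile (fun b => !b)).length : Int) - 1).toNat = i.toNat + (((filled.drop i.toNat).takeWhile (fun b => !b)).length - 1) := by omega
          simp only [hidx]
          rw [← List.getElem_drop]
          have hlen2 : ((filled.drop i.toNat).takeWhile (fun b => !b)).length - 1 < (filled.drop i.toNat).length := by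
            rw [List.length_drop]; omega
          rw [List.getElem_of_eq hsplit]
          rw [List.getElem_append_left (by simp; omega)]
          exact List.getElem_replicate _
          rw [List.length_drop]
          omega
        have hdec1 : decide ((0:Int) ≤ i + (((filled.drop i.toNat).takeWhile (fun b => !b)).length : Int) - 1) = true := by
          simp; omega
        have htk : (filled.drop i.toNat).take ((filled.drop i.toNat).takeWhile (fun b => !b)).length = List.replicate ((filled.drop i.toNat).takeWhile (fun b => !b)).length false := by
          rw [← pv_takeWhile_eq_take]
          exact pv_takeWhile_not_replicate _
        have htake2 : filled.take (i + (((filled.drop i.toNat).takeWhile (fun b => !b)).length : Int)).toNat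
            = filled.take i.toNat ++ List.replicate ((filled.drop i.toNat).takeWhile (fun b => !b)).length false := by
          rw [hjnat, List.take_add, htk]
        have hff : fillS false g ((filled.drop i.toNat).dropWhile (fun b => !b))
            = fillS true g ((filled.drop i.toNat).dropWhile (fun b => !b)) :=
          fillS_flag false true g _ (pv_head?_dropWhile_not _)
        rw [hflag, hdec1, htake2, hjnat, ← hrest]
        simp [List.append_assoc, hff]
termination_by ((filled.length : Int) - i).toNat
decreasing_by all_goals omega


theorem pySpansLoop_spec (flags : List Bool) (m i : Int) (spans : List (List Int)) (h0 : 0 ≤ i) :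
    pySpansLoop flags m (flags.length : Int) i spans
      = spans ++ ((runsGo none i (flags.drop i.toNat)).filter
            (fun r => r.2 - r.1 ≥ max 1 m)).map (fun r => [r.1, r.2]) := by
  unfold pySpansLoop
  by_cases hi : i < (flags.length : Int)
  case neg =>
    rw [dif_neg hi]
    rw [List.drop_eq_nil_of_le (by omega)]
    simp [runsGo]
  case pos =>
    have hlt : i.toNat < flags.length := by omega
    have hdrop : flags.drop i.toNat = flags[i.toNat] :: flags.drop (i.toNat + 1) :=
      List.drop_eq_getElem_cons hlt
    have hget : PySem.List.pyGetD flags i false = flags[i.toNat] :=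
      PySem.List.pyGetD_eq_getElem flags false h0 hi
    rw [dif_pos hi]
    cases hb : flags[i.toNat] with
    | false =>
      rw [dif_pos (by rw [hget, hb])]
      rw [pySpansLoop_spec flags m (i + 1) spans (by omega)]
      have e2 : (i + 1).toNat = i.toNat + 1 := by omega
      have : runsGo none i (flags.drop i.toNat) = runsGo none (i + 1) (flags.drop (i + 1).toNat) := by
        rw [hdrop, hb, e2]
        rfl
      rw [this]
    | true =>
      rw [dif_neg (by rw [hget, hb]; simp)]
      dsimp only
      rw [pySkipTrue_spec flags i h0]
      have hgap : i + (((flags.drop i.toNat).takeWhile (fun b => b)).length : Int) - i = (((flags.drop i.toNat).takeWhile (fun b => b)).length : Int) := by ring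
      have hknat : (i + (((flags.drop i.toNat).takeWhile (fun b => b)).length : Int)).toNat = i.toNat + ((flags.drop i.toNat).takeWhile (fun b => b)).length := by omega
      have hK1 : 1 ≤ ((flags.drop i.toNat).takeWhile (fun b => b)).length := by
        rw [hdrop, hb, List.takeWhile_cons]
        simp
      have hrun : runsGo none i (flags.drop i.toNat)
          = (i, i + (((flags.drop i.toNat).takeWhile (fun b => b)).length : Int)) :: runsGo none (i + (((flags.drop i.toNat).takeWhile (fun b => b)).length : Int)) (flags.drop (i + (((flags.drop i.toNat).takeWhile (fun b => b)).length : Int)).toNat) := by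
        have ht : (flags.drop i.toNat).takeWhile (fun b => b)
            = true :: (flags.drop (i.toNat + 1)).takeWhile (fun b => b) := by
          rw [hdrop, hb, List.takeWhile_cons]
          simp
        have hKk : (((flags.drop i.toNat).takeWhile (fun b => b)).length : Int) = (((flags.drop (i.toNat + 1)).takeWhile (fun b => b)).length : Int) + 1 := by
          rw [ht]
          push_cast
          simp
        have hdd : (flags.drop (i.toNat + 1)).dropWhile (fun b => b)
            = flags.drop ((i + (((flags.drop i.toNat).takeWhile (fun b => b)).length : Int)).toNat) := by
          rw [pv_dropWhile_eq_drop, List.drop_drop, hknat]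
          congr 1
          have := congrArg List.length ht
          simp at this
          omega
        have harith : i + 1 + (((flags.drop (i.toNat + 1)).takeWhile (fun b => b)).length : Int)
            = i + (((flags.drop i.toNat).takeWhile (fun b => b)).length : Int) := by
          rw [hKk]; ring
        conv_lhs => rw [hdrop, hb]
        have step : runsGo none i (true :: flags.drop (i.toNat + 1))
            = runsGo (some i) (i + 1) (flags.drop (i.toNat + 1)) := rfl
        rw [step, runsGo_some_spec, hdd, harith]
      rw [pySpansLoop_spec flags m (i + (((flags.drop i.toNat).takeWhile (fun b => b)).length : Int)) _ (by omega)]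
      rw [hrun, List.filter_cons]
      simp only [hgap]
      by_cases hcond : (((flags.drop i.toNat).takeWhile (fun b => b)).length : Int) ≥ max 1 m
      · rw [if_pos hcond, if_pos (by simpa using hcond)]
        simp
      · rw [if_neg hcond, if_neg (by simpa using hcond)]
termination_by ((flags.length : Int) - i).toNat
decreasing_by all_goals omega


theorem pv_head?_replicate_false (k : Nat) (r : List Bool) (hk : 1 ≤ k) :
    (List.replicate k false ++ r).head? = some false := by
  cases k with
  | zero => exact absurd hk (by simp)
  | succ k => simp [List.replicate_succ]

theorem fill_merge_aux (g : Int) (n : Nat) : ∀ (l : List Bool), l.length ≤ n →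
    ∀ (s p : Int), l.head? ≠ some true →
    runsGo (some s) p (fillS true g l) = mergeGo g (s, p) (runsGo none p l) := by
  induction n with
  | zero =>
    intro l hl s p h
    have hnil : l = [] := by
      cases l with
      | nil => rfl
      | cons x xs => simp at hl
    subst hnil
    simp [fillS_nil, runsGo, mergeGo]
  | succ n ih =>
    intro l hl s p h
    cases l with
    | nil => simp [fillS_nil, runsGo, mergeGo]
    | cons x xs =>
        cases x
        case true => simp at h
        case false =>
          have hm1 : 1 ≤ (((false :: xs).takeWhile (fun b => !b)).length) := by simp [List.takeWhile_cons]
          have hsplit : (false :: xs) = List.replicate (((false :: xs).takeWhile (fun b => !b)).length) false ++ ((false :: xs).dropWhile (fun b => !b)) := by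
            conv_lhs => rw [← List.takeWhile_append_dropWhile (p := fun b => !b) (l := false :: xs),
              pv_takeWhile_not_replicate]
          have hskip : runsGo none p (false :: xs) = runsGo none (p + ((((false :: xs).takeWhile (fun b => !b)).length) : Int)) ((false :: xs).dropWhile (fun b => !b)) := by
            conv_lhs => rw [hsplit]
            rw [runs_falses]
          rw [fillS_false_eq]
          by_cases hre : ((false :: xs).dropWhile (fun b => !b)) = []
          · have hcond : (true && !(((false :: xs).dropWhile (fun b => !b))).isEmpty && decide (((((false :: xs).takeWhile (fun b => !b)).length) : Int) ≤ g)) = false := by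
              rw [hre]
              simp
            rw [hcond, if_neg (by simp), hre, fillS_nil]
            rw [runsGo_close _ _ _ (by rw [pv_head?_replicate_false _ _ hm1]; simp)]
            rw [runs_falses, hskip, hre]
            simp [runsGo, mergeGo]
          · have hRhead : ((false :: xs).dropWhile (fun b => !b)).head? ≠ some false := pv_head?_dropWhile_not (false :: xs)
            have hRtrue : ((false :: xs).dropWhile (fun b => !b)) = true :: ((false :: xs).dropWhile (fun b => !b)).tail := by
              cases hr : ((false :: xs).dropWhile (fun b => !b)) with
              | nil => exact absurd hr hre
              | cons b tl =>
                cases b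
                · rw [hr] at hRhead; simp at hRhead
                · simp [hr]
            have hK1 : 1 ≤ ((((false :: xs).dropWhile (fun b => !b)).takeWhile (fun b => b)).length) := by
              rw [hRtrue]
              simp [List.takeWhile_cons]
            have hsplit2 : ((false :: xs).dropWhile (fun b => !b)) = List.replicate ((((false :: xs).dropWhile (fun b => !b)).takeWhile (fun b => b)).length) true ++ (((false :: xs).dropWhile (fun b => !b)).dropWhile (fun b => b)) := by
              conv_lhs => rw [← List.takeWhile_append_dropWhile (p := fun b => b) (l := ((false :: xs).dropWhile (fun b => !b))),
                pv_takeWhile_id_replicate]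
            have hr2head : (((false :: xs).dropWhile (fun b => !b)).dropWhile (fun b => b)).head? ≠ some true := pv_head?_dropWhile_id ((false :: xs).dropWhile (fun b => !b))
            have hfill_rest : fillS true g ((false :: xs).dropWhile (fun b => !b)) = List.replicate ((((false :: xs).dropWhile (fun b => !b)).takeWhile (fun b => b)).length) true ++ fillS true g (((false :: xs).dropWhile (fun b => !b)).dropWhile (fun b => b)) := by
              conv_lhs => rw [hsplit2]
              rw [fillS_trues _ _ _ _ (by omega)]
            have hmid : runsGo none p (false :: xs)
                = (p + ((((false :: xs).takeWhile (fun b => !b)).length) : Int), p + ((((false :: xs).takeWhile (fun b => !b)).length) : Int) + (((((false :: xs).dropWhile (fun b => !b)).takeWhile (fun b => b)).length) : Int))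
                  :: runsGo none (p + ((((false :: xs).takeWhile (fun b => !b)).length) : Int) + (((((false :: xs).dropWhile (fun b => !b)).takeWhile (fun b => b)).length) : Int)) (((false :: xs).dropWhile (fun b => !b)).dropWhile (fun b => b)) := by
              rw [hskip]
              conv_lhs => rw [hsplit2]
              rw [runs_none_true_block _ (by omega), runsGo_close _ _ _ hr2head]
            by_cases hg : (((((false :: xs).takeWhile (fun b => !b)).length) : Int)) ≤ g
            · have hIH := ih (((false :: xs).dropWhile (fun b => !b)).dropWhile (fun b => b)) (by
                have h1 : (((false :: xs).dropWhile (fun b => !b)) : List Bool).length ≤ xs.length := by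
                  rw [List.dropWhile_cons]
                  simpa using List.length_dropWhile_le (fun b => !b) xs
                have h2 := List.length_dropWhile_le (fun b => b) ((false :: xs).dropWhile (fun b => !b))
                simp only [List.length_cons] at hl
                omega) s (p + ((((false :: xs).takeWhile (fun b => !b)).length) : Int) + (((((false :: xs).dropWhile (fun b => !b)).takeWhile (fun b => b)).length) : Int)) hr2head
              have hie : ((false :: xs).dropWhile (fun b => !b)).isEmpty = false := by
                rw [hRtrue]
                rfl
              have hcond : (true && !(((false :: xs).dropWhile (fun b => !b))).isEmpty && decide (((((false :: xs).takeWhile (fun b => !b)).length) : Int) ≤ g)) = true := by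
                rw [hie]
                simp only [Bool.not_false, Bool.true_and, decide_eq_true hg]
              rw [hcond, if_pos rfl, hfill_rest, runs_trues, runs_trues, hIH, hmid]
              simp only [mergeGo]
              rw [if_pos (show (p + ((((false :: xs).takeWhile (fun b => !b)).length) : Int), p + ((((false :: xs).takeWhile (fun b => !b)).length) : Int) + (((((false :: xs).dropWhile (fun b => !b)).takeWhile (fun b => b)).length) : Int)).1 - (s, p).2 ≤ g by
                dsimp only; omega)]
            · have hIH := ih (((false :: xs).dropWhile (fun b => !b)).dropWhile (fun b => b)) (by
                have h1 : (((false :: xs).dropWhile (fun b => !b)) : List Bool).length ≤ xs.length := by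
                  rw [List.dropWhile_cons]
                  simpa using List.length_dropWhile_le (fun b => !b) xs
                have h2 := List.length_dropWhile_le (fun b => b) ((false :: xs).dropWhile (fun b => !b))
                simp only [List.length_cons] at hl
                omega) (p + ((((false :: xs).takeWhile (fun b => !b)).length) : Int)) (p + ((((false :: xs).takeWhile (fun b => !b)).length) : Int) + (((((false :: xs).dropWhile (fun b => !b)).takeWhile (fun b => b)).length) : Int)) hr2head
              have hcond : (true && !(((false :: xs).dropWhile (fun b => !b))).isEmpty && decide (((((false :: xs).takeWhile (fun b => !b)).length) : Int) ≤ g)) = false := by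
                simp only [decide_eq_false hg, Bool.and_false]
              rw [hcond, if_neg (by simp), hfill_rest]
              rw [runsGo_close _ _ _ (by rw [pv_head?_replicate_false _ _ hm1]; simp)]
              rw [runs_falses, runs_none_true_block _ (by omega), hIH, hmid]
              simp only [mergeGo]
              rw [if_neg (show ¬ (p + ((((false :: xs).takeWhile (fun b => !b)).length) : Int), p + ((((false :: xs).takeWhile (fun b => !b)).length) : Int) + (((((false :: xs).dropWhile (fun b => !b)).takeWhile (fun b => b)).length) : Int)).1 - (s, p).2 ≤ g by
                dsimp only; omega)]

theorem fill_merge (g : Int) (l : List Bool) (s p : Int) (h : l.head? ≠ some true) :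
    runsGo (some s) p (fillS true g l) = mergeGo g (s, p) (runsGo none p l) :=
  fill_merge_aux g l.length l le_rfl s p h


theorem fill_top' (g : Int) (l : List Bool) (q : Int) (h : l.head? ≠ some false) :
    runsGo none q (fillS true g l) = mergeRuns g (runsGo none q l) := by
  cases hl : l with
  | nil => simp [fillS_nil, runsGo, mergeRuns]
  | cons x xs =>
    cases x
    · rw [hl] at h; simp at h
    · rw [← hl]
      have hK1 : 1 ≤ ((l.takeWhile (fun b => b)).length) := by
        rw [hl]
        simp [List.takeWhile_cons]
      have hsplit2 : l = List.replicate ((l.takeWhile (fun b => b)).length) true ++ (l.dropWhile (fun b => b)) := by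
        conv_lhs => rw [← List.takeWhile_append_dropWhile (p := fun b => b) (l := l),
          pv_takeWhile_id_replicate]
      have hr2head : (l.dropWhile (fun b => b)).head? ≠ some true := pv_head?_dropWhile_id l
      have hfill : fillS true g l = List.replicate ((l.takeWhile (fun b => b)).length) true ++ fillS true g (l.dropWhile (fun b => b)) := by
        conv_lhs => rw [hsplit2]
        rw [fillS_trues _ _ _ _ (by omega)]
      have hruns : runsGo none q l = (q, q + (((l.takeWhile (fun b => b)).length) : Int)) :: runsGo none (q + (((l.takeWhile (fun b => b)).length) : Int)) (l.dropWhile (fun b => b)) := by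
        conv_lhs => rw [hsplit2]
        rw [runs_none_true_block _ (by omega), runsGo_close _ _ _ hr2head]
      rw [hfill, runs_none_true_block _ (by omega), fill_merge g (l.dropWhile (fun b => b)) q (q + (((l.takeWhile (fun b => b)).length) : Int)) hr2head,
        hruns]
      rfl

theorem fill_top (g : Int) (l : List Bool) (q : Int) :
    runsGo none q (fillS false g l) = mergeRuns g (runsGo none q l) := by
  cases l with
  | nil => simp [fillS_nil, runsGo, mergeRuns]
  | cons x xs =>
    cases x
    case true =>
      rw [fillS_flag false true g _ (by simp)]
      exact fill_top' g _ q (by simp)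
    case false =>
      rw [fillS_false_eq]
      have hm1 : 1 ≤ (((false :: xs).takeWhile (fun b => !b)).length) := by
        simp [List.takeWhile_cons]
      have hcond : (false && !(((false :: xs).dropWhile (fun b => !b))).isEmpty
          && decide ((((((false :: xs).takeWhile (fun b => !b)).length)) : Int) ≤ g)) = false := by
        simp
      rw [hcond, if_neg (by simp), runs_falses]
      rw [fill_top' g ((false :: xs).dropWhile (fun b => !b)) _ (pv_head?_dropWhile_not (false :: xs))]
      have hskip : runsGo none q (false :: xs)
          = runsGo none (q + ((((false :: xs).takeWhile (fun b => !b)).length) : Int))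
              ((false :: xs).dropWhile (fun b => !b)) := by
        conv_lhs => rw [← List.takeWhile_append_dropWhile (p := fun b => !b) (l := false :: xs),
          pv_takeWhile_not_replicate]
        rw [runs_falses]
      rw [hskip]

theorem noMerge_aux (g : Int) (hg : g ≤ 0) (n : Nat) : ∀ (l : List Bool), l.length ≤ n →
    ∀ (p : Int),
    mergeRuns g (runsGo none p l) = runsGo none p l ∧
    (∀ s e : Int, e < p → mergeGo g (s, e) (runsGo none p l) = (s, e) :: runsGo none p l) := by
  induction n with
  | zero =>
    intro l hl p
    have hnil : l = [] := by
      cases l with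
      | nil => rfl
      | cons x xs => simp at hl
    subst hnil
    simp [runsGo, mergeRuns, mergeGo]
  | succ n ih =>
    intro l hl p
    by_cases hnil : l.dropWhile (fun b => !b) = []
    · rw [runs_decomp_nil l p hnil]
      simp [mergeRuns, mergeGo]
    · rw [runs_decomp l p hnil]
      have hlen1 : 1 ≤ l.length := by
        cases l with
        | nil => simp at hnil
        | cons x xs => simp
      have hhead : (l.dropWhile (fun b => !b)).head? ≠ some false := pv_head?_dropWhile_not l
      have hr2head : ((l.dropWhile (fun b => !b)).dropWhile (fun b => b)).head? ≠ some true :=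
        pv_head?_dropWhile_id _
      have hdlen : (l.dropWhile (fun b => !b)).length ≤ l.length := List.length_dropWhile_le _ l
      have hd2len : ((l.dropWhile (fun b => !b)).dropWhile (fun b => b)).length
          ≤ (l.dropWhile (fun b => !b)).length := List.length_dropWhile_le _ _
      have hT : ∀ (a b : Int),
          mergeGo g (a, b)
            (runsGo none b ((l.dropWhile (fun b => !b)).dropWhile (fun b => b)))
          = (a, b) :: runsGo none b ((l.dropWhile (fun b => !b)).dropWhile (fun b => b)) := by
        intro a b
        cases hr2 : (l.dropWhile (fun b => !b)).dropWhile (fun b => b) with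
        | nil => simp [runsGo, mergeGo]
        | cons y ys =>
          cases y
          · show mergeGo g (a, b) (runsGo none (b + 1) ys) = (a, b) :: runsGo none (b + 1) ys
            exact (ih ys (by
              have := congrArg List.length hr2
              simp at this
              omega) (b + 1)).2 a b (by omega)
          · rw [hr2] at hr2head; simp at hr2head
      constructor
      · show mergeGo g _ _ = _
        exact hT _ _
      · intro s e he
        show mergeGo g (s, e) (_ :: _) = _
        rw [mergeGo]
        rw [if_neg (by simp only [Prod.fst, Prod.snd]; omega)]
        rw [hT _ _]

theorem merge_id (g : Int) (hg : g ≤ 0) (l : List Bool) (p : Int) :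
    mergeRuns g (runsGo none p l) = runsGo none p l :=
  (noMerge_aux g hg l.length l le_rfl p).1


def pvFlush (x : List (Int × Int) × Option Int × Int) : List (Int × Int) :=
  match x.2.1 with
  | some s => x.1 ++ [(s, x.2.2)]
  | none => x.1

theorem collect_go (l : List Bool) (rs : List (Int × Int)) (st : Option Int) (p : Int) :
    pvFlush (l.foldl altStep (rs, st, p)) = rs ++ runsGo st p l := by
  induction l generalizing rs st p with
  | nil => cases st <;> simp [pvFlush, runsGo]
  | cons f xs ih =>
    rw [List.foldl_cons]
    cases f
    · cases st with
      | none =>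
        rw [show altStep (rs, none, p) false = (rs, none, p + 1) from rfl, ih]
        rfl
      | some s0 =>
        rw [show altStep (rs, some s0, p) false = (rs ++ [(s0, p)], none, p + 1) from rfl, ih,
          List.append_assoc]
        rfl
    · cases st with
      | none =>
        rw [show altStep (rs, none, p) true = (rs, some p, p + 1) from rfl, ih]
        rfl
      | some s0 =>
        rw [show altStep (rs, some s0, p) true = (rs, some s0, p + 1) from rfl, ih]
        rfl

theorem altCollect_eq (flags : List Bool) : altCollect flags = runsGo none 0 flags := by
  have h := collect_go flags [] none 0
  rw [List.nil_append] at h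
  exact h

theorem mergeFold_go (g : Int) (rs : List (Int × Int)) (acc : List (Int × Int)) (cur : Int × Int) :
    rs.foldl (altMergeStep g) (acc ++ [cur]) = acc ++ mergeGo g cur rs := by
  induction rs generalizing acc cur with
  | nil => simp [mergeGo]
  | cons r rst ih =>
    rw [List.foldl_cons]
    have hstep : altMergeStep g (acc ++ [cur]) r
        = if r.1 - cur.2 ≤ g then acc ++ [(cur.1, r.2)] else (acc ++ [cur]) ++ [r] := by
      unfold altMergeStep
      rw [List.getLast?_concat]
      simp [List.dropLast_concat]
    by_cases hle : r.1 - cur.2 ≤ g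
    · rw [hstep, if_pos hle, ih, mergeGo, if_pos hle]
    · rw [hstep, if_neg hle, ih, mergeGo, if_neg hle]
      simp

theorem altMerge_eq (g : Int) (rs : List (Int × Int)) : altMerge g rs = mergeRuns g rs := by
  cases rs with
  | nil => rfl
  | cons r rst =>
    unfold altMerge
    rw [List.foldl_cons]
    rw [show altMergeStep g [] r = [] ++ [r] from rfl, mergeFold_go]
    rfl


-- ===== VERDICT (by name: the statement is the Claim_ definition above) =====
theorem alt_normal (flags : List Bool) (m g : Int) :
    bool_runs_to_spans_alt flags m g
      = ((mergeRuns g (runsGo none 0 flags)).filter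
          (fun r => r.2 - r.1 ≥ max 1 m)).map (fun r => [r.1, r.2]) := by
  unfold bool_runs_to_spans_alt
  rw [altMerge_eq, altCollect_eq]

theorem bool_runs_to_spans_spec : Claim_equal_bool_runs_to_spans := by
  unfold Claim_equal_bool_runs_to_spans
  intro flags m g _
  unfold Spec_bool_runs_to_spans
  rw [alt_normal]
  unfold bool_runs_to_spans
  by_cases hnil : flags.isEmpty
  · rw [if_pos hnil]
    have h : flags = [] := by simpa using hnil
    subst h
    simp [runsGo, mergeRuns]
  · rw [if_neg hnil]
    dsimp only
    by_cases hgf : g > 0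
    · rw [if_pos hgf]
      have hfill : pyFillLoop flags g (flags.length : Int) 0 = fillS false g flags := by
        have h := pyFillLoop_spec flags g 0 le_rfl
        simpa using h
      rw [hfill, pySpansLoop_spec _ m 0 [] le_rfl]
      simp only [Int.toNat_zero, List.drop_zero, List.nil_append]
      rw [fill_top]
    · rw [if_neg hgf]
      rw [pySpansLoop_spec flags m 0 [] le_rfl]
      simp only [Int.toNat_zero, List.drop_zero, List.nil_append]
      rw [merge_id g (by omega) flags 0]
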